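-- pv_equiv track=rewrite | github.com/Mr-Bani/Linear-Algebra-Exercise | hill-dec.py | matrix_mod_inverse
-- ===== SOURCE A (Python) =====
-- def get_matrix_minor(matrix, i, j):
--     return [row[:j] + row[j+1:] for row in (matrix[:i] + matrix[i+1:])]
--
-- def calculate_determinant(matrix):
--     if len(matrix) == 1:
--         return matrix[0][0]
--     if len(matrix) == 2:
--         return matrix[0][0] * matrix[1][1] - matrix[0][1] * matrix[1][0]
--     determinant = 0
--     for c in range(len(matrix)):
--         determinant += ((-1) ** c) * matrix[0][c] * calculate_determinant(get_matrix_minor(matrix, 0, c))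
--     return determinant
--
-- def mod_inverse(a, m):
--     a = a % m
--     for x in range(1, m):
--         if (a * x) % m == 1:
--             return x
--     return -1
--
-- def matrix_mod_inverse(matrix, modulus):
--     n = len(matrix)
--     determinant = calculate_determinant(matrix)
--     determinant = determinant % modulus
--     determinant_inv = mod_inverse(determinant, modulus)
--     if determinant_inv == -1:
--         return None
--
--     cofactors = []
--     for r in range(n):
--         cofactor_row = []
--         for c in range(n):
--             minor = get_matrix_minor(matrix, r, c)
--             cofactor_row.append(((-1) ** (r + c)) * calculate_determinant(minor))
--         cofactors.append(cofactor_row)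
--
--     for r in range(n):
--         for c in range(r, n):
--             cofactors[r][c], cofactors[c][r] = cofactors[c][r], cofactors[r][c]
--
--     for r in range(n):
--         for c in range(n):
--             cofactors[r][c] = (cofactors[r][c] * determinant_inv) % modulus
--             cofactors[r][c] = cofactors[r][c] % modulus
--
--     return cofactors
-- ===== SOURCE B (Python) =====
-- # Leibniz permutation-sum inverse: a signed-permutation table is built once and
-- # shared by every determinant (no minors are materialised, no per-cofactor
-- # recursion), the modular inverse comes from the extended Euclidean algorithm,
-- # and the transposed, reduced adjugate is emitted directly.
--
-- def _signed_perms(items):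
--     # all permutations of `items` with their parities, by choice of head element
--     if not items:
--         return [([], 1)]
--     result = []
--     sign = 1
--     for k in range(len(items)):
--         for rest, s in _signed_perms(items[:k] + items[k + 1:]):
--             result.append(([items[k]] + rest, sign * s))
--         sign = -sign
--     return result
--
--
-- def _det(matrix, rows, cols, perms):
--     # Leibniz sum: perms is the signed-permutation table of range(len(cols))
--     total = 0
--     for p, s in perms:
--         prod = s
--         for t in range(len(rows)):
--             prod *= matrix[rows[t]][cols[p[t]]]
--         total += prod
--     return total
--
--
-- def _egcd(a, b):
--     old_r, r = a, b
--     old_s, s = 1, 0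
--     while r != 0:
--         q = old_r // r
--         old_r, r = r, old_r - q * r
--         old_s, s = s, old_s - q * s
--     return old_r, old_s
--
--
-- def _mod_inv(a, m):
--     a = a % m
--     g, x = _egcd(a, m)
--     x = x % m
--     if (a * x) % m == 1:
--         return x
--     return None
--
--
-- def matrix_mod_inverse(matrix, modulus):
--     n = len(matrix)
--     idx = list(range(n))
--     det = _det(matrix, idx, idx, _signed_perms(idx))
--     inv = _mod_inv(det, modulus)
--     if inv is None:
--         return None
--     sub = _signed_perms(list(range(n - 1)))
--     return [[((1 if (r + c) % 2 == 0 else -1)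
--               * _det(matrix,
--                      [i for i in range(n) if i != c],
--                      [j for j in range(n) if j != r],
--                      sub)
--               * inv) % modulus
--              for c in range(n)]
--             for r in range(n)]
-- ===== Notes on version B (the rewrite author's own statement) =====
-- stated objective: alternative
-- what changed: B replaces A's recursive Laplace cofactor expansion over materialised minor matrices with the Leibniz permutation-sum determinant evaluated from a signed-permutation table built once and shared by all cofactors, replaces the brute-force modular-inverse search with the extended Euclidean algorithm, and emits the transposed reduced adjugate directly instead of A's build/transpose/normalise passes.
-- intended difference: For 0x0 and 1x1 matrices with modulus >= 2 and invertible determinant, A returns None resp. [[0]] because its determinant of an empty minor is 0 instead of 1; B returns [] resp. [[inverse of the entry]], the mathematically correct inverse. — e.g. on matrix_mod_inverse([[3]], 26): A returns some [[0]], B returns some [[9]]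
import Mathlib
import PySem

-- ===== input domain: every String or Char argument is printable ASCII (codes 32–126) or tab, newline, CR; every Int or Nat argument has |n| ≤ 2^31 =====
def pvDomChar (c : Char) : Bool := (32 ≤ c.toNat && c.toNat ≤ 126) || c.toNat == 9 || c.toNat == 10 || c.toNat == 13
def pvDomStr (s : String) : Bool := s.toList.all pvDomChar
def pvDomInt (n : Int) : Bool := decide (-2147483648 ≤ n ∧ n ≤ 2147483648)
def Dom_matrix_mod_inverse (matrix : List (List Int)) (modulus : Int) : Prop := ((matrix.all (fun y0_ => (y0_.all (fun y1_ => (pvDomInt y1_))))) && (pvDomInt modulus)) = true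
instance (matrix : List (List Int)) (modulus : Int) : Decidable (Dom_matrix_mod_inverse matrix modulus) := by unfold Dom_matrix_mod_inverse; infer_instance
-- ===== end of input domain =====

-- B replaces A's recursive Laplace cofactor expansion over materialised minors by the Leibniz
-- permutation-sum determinant driven by a signed-permutation table built once and shared by all
-- cofactors, an extended-Euclid modular inverse, and direct emission of the transposed reduced
-- adjugate (objective: alternative; on 0x0/1x1 matrices with invertible determinant B returns the
-- correct inverse where A returns None resp. [[0]] — see D_ below).

-- ===== PORT A =====
-- indexing note: matrix[i][j] is ported as pyGetD (IndexError = out of range); Pre_ keeps every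
-- index used by either program in range, so the defaults are never consumed on admitted inputs.

def get_matrix_minor (matrix : List (List Int)) (i j : Int) : List (List Int) :=
  (PySem.List.slice matrix none (some i) ++ PySem.List.slice matrix (some (i + 1)) none).map
    (fun row => PySem.List.slice row none (some j) ++ PySem.List.slice row (some (j + 1)) none)

-- termination helper for `calculate_determinant` (the minor has one row fewer)
theorem pv_minor_len (matrix : List (List Int)) (c : Int) :
    (get_matrix_minor matrix 0 c).length = matrix.length - 1 := by
  simp [get_matrix_minor, PySem.List.slice_to matrix (by omega : (0:Int) ≤ 0),
    PySem.List.slice_from_one]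

def calculate_determinant (matrix : List (List Int)) : Int :=
  if matrix.length == 1 then
    PySem.List.pyGetD (PySem.List.pyGetD matrix 0 []) 0 0
  else if matrix.length == 2 then
    PySem.List.pyGetD (PySem.List.pyGetD matrix 0 []) 0 0 * PySem.List.pyGetD (PySem.List.pyGetD matrix 1 []) 1 0
      - PySem.List.pyGetD (PySem.List.pyGetD matrix 0 []) 1 0 * PySem.List.pyGetD (PySem.List.pyGetD matrix 1 []) 0 0
  else
    -- 'for c in range(len(matrix))' with a recursive call in the body: folded over the
    -- attached range so the recursion can be justified (values are unchanged)
    (PySem.List.pyRange 0 matrix.length 1).attach.foldl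
      (fun determinant c =>
        determinant + (-1 : Int) ^ c.1.toNat * PySem.List.pyGetD (PySem.List.pyGetD matrix 0 []) c.1 0
          * calculate_determinant (get_matrix_minor matrix 0 c.1))
      0
termination_by matrix.length
decreasing_by
  have hc := PySem.List.mem_pyRange_one.1 c.2
  have := pv_minor_len matrix c.1
  omega

-- first x in range(1, m) with (a*x) % m == 1, else -1 (early return as structural recursion)
def mod_inverse_loop (a m : Int) : List Int → Int
  | [] => -1
  | x :: xs => if PySem.Int.mod (a * x) m == 1 then x else mod_inverse_loop a m xs

def mod_inverse (a m : Int) : Int :=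
  mod_inverse_loop (PySem.Int.mod a m) m (PySem.List.pyRange 1 m 1)

def matrix_mod_inverse (matrix : List (List Int)) (modulus : Int) : Option (List (List Int)) :=
  let n : Int := matrix.length
  let determinant := calculate_determinant matrix
  let determinant := PySem.Int.mod determinant modulus
  let determinant_inv := mod_inverse determinant modulus
  if determinant_inv == -1 then none
  else
    let cofactors : List (List Int) :=
      (PySem.List.pyRange 0 n 1).foldl
        (fun cofactors r =>
          cofactors ++ [(PySem.List.pyRange 0 n 1).foldl
            (fun cofactor_row c =>
              cofactor_row ++ [(-1 : Int) ^ (r + c).toNat * calculate_determinant (get_matrix_minor matrix r c)])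
            []])
        []
    -- in-place transpose: cofactors[r][c], cofactors[c][r] = cofactors[c][r], cofactors[r][c]
    let cofactors : List (List Int) :=
      (PySem.List.pyRange 0 n 1).foldl
        (fun cofactors r =>
          (PySem.List.pyRange r n 1).foldl
            (fun cofactors c =>
              let x := PySem.List.pyGetD (PySem.List.pyGetD cofactors r []) c 0
              let y := PySem.List.pyGetD (PySem.List.pyGetD cofactors c []) r 0
              let cofactors := PySem.List.pySetD cofactors r
                (PySem.List.pySetD (PySem.List.pyGetD cofactors r []) c y)
              PySem.List.pySetD cofactors c
                (PySem.List.pySetD (PySem.List.pyGetD cofactors c []) r x))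
            cofactors)
        cofactors
    -- cofactors[r][c] = (cofactors[r][c] * determinant_inv) % modulus;  then % modulus again
    let cofactors : List (List Int) :=
      (PySem.List.pyRange 0 n 1).foldl
        (fun cofactors r =>
          (PySem.List.pyRange 0 n 1).foldl
            (fun cofactors c =>
              let v := PySem.Int.mod (PySem.List.pyGetD (PySem.List.pyGetD cofactors r []) c 0 * determinant_inv) modulus
              let cofactors := PySem.List.pySetD cofactors r
                (PySem.List.pySetD (PySem.List.pyGetD cofactors r []) c v)
              let v2 := PySem.Int.mod (PySem.List.pyGetD (PySem.List.pyGetD cofactors r []) c 0) modulus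
              PySem.List.pySetD cofactors r
                (PySem.List.pySetD (PySem.List.pyGetD cofactors r []) c v2))
            cofactors)
        cofactors
    some cofactors

-- ===== PORT B =====

-- termination helper: removing element k leaves a strictly shorter list
theorem pv_cols_len (cols : List Int) (i : Int) (h0 : 0 ≤ i) (h : i < (cols.length : Int)) :
    (PySem.List.slice cols none (some i) ++ PySem.List.slice cols (some (i + 1)) none).length
      < cols.length := by
  simp [PySem.List.slice_to cols h0, PySem.List.slice_from cols (by omega : (0:Int) ≤ i + 1)]
  omega

-- _signed_perms: every permutation of `items` with its parity, by choice of head element;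
-- the running sign of the 'for k' loop is the second accumulator component
def signed_perms (items : List Int) : List (List Int × Int) :=
  if items.length == 0 then [([], 1)]
  else
    ((PySem.List.pyRange 0 items.length 1).attach.foldl
      (fun (acc : List (List Int × Int) × Int) k =>
        (acc.1 ++ (signed_perms (PySem.List.slice items none (some k.1) ++ PySem.List.slice items (some (k.1 + 1)) none)).map
            (fun rs => (PySem.List.pyGetD items k.1 0 :: rs.1, acc.2 * rs.2)),
         -acc.2))
      ([], 1)).1
termination_by items.length
decreasing_by
  have hk := PySem.List.mem_pyRange_one.1 k.2
  exact pv_cols_len items k.1 hk.1 (by simpa using hk.2)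

-- _det: Leibniz sum over the signed-permutation table
def det_perm (matrix : List (List Int)) (rows cols : List Int) (perms : List (List Int × Int)) : Int :=
  perms.foldl
    (fun total ps =>
      total + (PySem.List.pyRange 0 rows.length 1).foldl
        (fun prod t =>
          prod * PySem.List.pyGetD (PySem.List.pyGetD matrix (PySem.List.pyGetD rows t 0) [])
                   (PySem.List.pyGetD cols (PySem.List.pyGetD ps.1 t 0) 0) 0)
        ps.2)
    0

-- termination helper for the extended-Euclid loop: the remainder shrinks in absolute value
theorem pv_mod_abs_lt (a b : Int) (hb : b ≠ 0) : (PySem.Int.mod a b).natAbs < b.natAbs := by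
  rcases lt_or_gt_of_ne hb with h | h
  · have := PySem.Int.mod_neg_bounds a h; omega
  · have h1 := PySem.Int.mod_nonneg a h; have h2 := PySem.Int.mod_lt a h; omega

theorem pv_egcd_step (oldr r : Int) :
    oldr - PySem.Int.floordiv oldr r * r = PySem.Int.mod oldr r := by
  have := PySem.Int.floordiv_mul_add_mod oldr r; omega

-- _egcd: iterative extended Euclidean algorithm (the Bezout coefficient for the first argument)
def egcd_loop (oldr r olds s : Int) : Int × Int :=
  if r == 0 then (oldr, olds)
  else
    let q := PySem.Int.floordiv oldr r
    egcd_loop r (oldr - q * r) s (olds - q * s)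
termination_by r.natAbs
decreasing_by
  rename_i hr
  rw [pv_egcd_step]
  exact pv_mod_abs_lt oldr r (by simpa using hr)

def egcd (a b : Int) : Int × Int := egcd_loop a b 1 0

def mod_inv_alt (a m : Int) : Option Int :=
  let a := PySem.Int.mod a m
  let gx := egcd a m
  let x := PySem.Int.mod gx.2 m
  if PySem.Int.mod (a * x) m == 1 then some x else none

def matrix_mod_inverse_alt (matrix : List (List Int)) (modulus : Int) : Option (List (List Int)) :=
  let n : Int := matrix.length
  let idx := PySem.List.pyRange 0 n 1
  let det := det_perm matrix idx idx (signed_perms idx)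
  match mod_inv_alt det modulus with
  | none => none
  | some inv =>
    let sub := signed_perms (PySem.List.pyRange 0 (n - 1) 1)
    some ((PySem.List.pyRange 0 n 1).map (fun r =>
      (PySem.List.pyRange 0 n 1).map (fun c =>
        PySem.Int.mod
          ((if PySem.Int.mod (r + c) 2 == 0 then (1 : Int) else -1)
            * det_perm matrix ((PySem.List.pyRange 0 n 1).filter (fun i => i != c))
                ((PySem.List.pyRange 0 n 1).filter (fun j => j != r)) sub
            * inv)
          modulus)))

-- ===== PRECONDITION & SPEC =====
-- Pre_ excludes only inputs on which A raises: modulus = 0 (ZeroDivisionError) and matrices with a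
-- row shorter than the number of rows (IndexError somewhere in the cofactor expansion).
def Pre_matrix_mod_inverse (matrix : List (List Int)) (modulus : Int) : Prop :=
  modulus ≠ 0 ∧ ∀ row ∈ matrix, matrix.length ≤ row.length

instance (matrix : List (List Int)) (modulus : Int) : Decidable (Pre_matrix_mod_inverse matrix modulus) := by
  unfold Pre_matrix_mod_inverse; infer_instance

def pvWitness_matrix_mod_inverse : List (List Int) × Int := ([[1, 2, 3], [0, 1, 4], [5, 6, 0]], 26)

-- On 0x0 and 1x1 matrices whose determinant is invertible (modulus >= 2), A returns None resp.
-- [[0]] because its determinant of the empty minor is 0 instead of 1; B returns [] resp. the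
-- inverse of the single entry, the mathematically correct matrix inverse.
def D_matrix_mod_inverse (matrix : List (List Int)) (modulus : Int) : Prop :=
  2 ≤ modulus ∧
    (matrix = [] ∨ (matrix.length = 1 ∧ Int.gcd ((matrix.headD []).headD 0) modulus = 1))

instance (matrix : List (List Int)) (modulus : Int) : Decidable (D_matrix_mod_inverse matrix modulus) := by
  unfold D_matrix_mod_inverse; infer_instance

def Spec_matrix_mod_inverse (matrix : List (List Int)) (modulus : Int) (out : Option (List (List Int))) : Prop :=
  ¬ D_matrix_mod_inverse matrix modulus → out = matrix_mod_inverse_alt matrix modulus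
instance (matrix : List (List Int)) (modulus : Int) (out : Option (List (List Int))) : Decidable (Spec_matrix_mod_inverse matrix modulus out) := by unfold Spec_matrix_mod_inverse; infer_instance

def pvDiffWitness_matrix_mod_inverse : List (List Int) × Int := ([[3]], 26)
def pvDiffWitnessOut_matrix_mod_inverse : (Option (List (List Int))) × (Option (List (List Int))) :=
  (some [[0]], some [[9]])

-- ===== CLAIM (what is proved, stated in full; the proofs are below) =====
def Claim_unchanged_matrix_mod_inverse : Prop := ∀ (matrix : List (List Int)) (modulus : Int), Dom_matrix_mod_inverse matrix modulus → Pre_matrix_mod_inverse matrix modulus → Spec_matrix_mod_inverse matrix modulus (matrix_mod_inverse matrix modulus)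
def Claim_changed_matrix_mod_inverse : Prop := Dom_matrix_mod_inverse (pvDiffWitness_matrix_mod_inverse.1) (pvDiffWitness_matrix_mod_inverse.2) ∧ Pre_matrix_mod_inverse (pvDiffWitness_matrix_mod_inverse.1) (pvDiffWitness_matrix_mod_inverse.2) ∧ D_matrix_mod_inverse (pvDiffWitness_matrix_mod_inverse.1) (pvDiffWitness_matrix_mod_inverse.2) ∧ matrix_mod_inverse (pvDiffWitness_matrix_mod_inverse.1) (pvDiffWitness_matrix_mod_inverse.2) = pvDiffWitnessOut_matrix_mod_inverse.1 ∧ matrix_mod_inverse_alt (pvDiffWitness_matrix_mod_inverse.1) (pvDiffWitness_matrix_mod_inverse.2) = pvDiffWitnessOut_matrix_mod_inverse.2 ∧ pvDiffWitnessOut_matrix_mod_inverse.1 ≠ pvDiffWitnessOut_matrix_mod_inverse.2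
def Claim_exact_matrix_mod_inverse : Prop := ∀ (matrix : List (List Int)) (modulus : Int), Dom_matrix_mod_inverse matrix modulus → Pre_matrix_mod_inverse matrix modulus → D_matrix_mod_inverse matrix modulus → matrix_mod_inverse matrix modulus ≠ matrix_mod_inverse_alt matrix modulus

-- ===== LEMMAS AND PROOFS =====

-- proof-side reference: Laplace expansion addressed by row/column index lists (used only to
-- mediate between A's recursion on materialised minors and B's Leibniz permutation sum)
def det_idx (matrix : List (List Int)) (rows cols : List Int) : Int :=
  if rows.length == 1 then
    PySem.List.pyGetD (PySem.List.pyGetD matrix (PySem.List.pyGetD rows 0 0) []) (PySem.List.pyGetD cols 0 0) 0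
  else
    let rest := PySem.List.slice rows (some 1) none
    ((PySem.List.pyRange 0 cols.length 1).attach.foldl
      (fun (ts : Int × Int) i =>
        (ts.1 + ts.2 * PySem.List.pyGetD (PySem.List.pyGetD matrix (PySem.List.pyGetD rows 0 0) []) (PySem.List.pyGetD cols i.1 0) 0
            * det_idx matrix rest (PySem.List.slice cols none (some i.1) ++ PySem.List.slice cols (some (i.1 + 1)) none),
          -ts.2))
      (0, 1)).1
termination_by cols.length
decreasing_by
  have hi := PySem.List.mem_pyRange_one.1 i.2
  exact pv_cols_len cols i.1 hi.1 (by simpa using hi.2)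

-- entry access m[r][c] (with the ports' defaults)
def pvE (m : List (List Int)) (r c : Int) : Int :=
  PySem.List.pyGetD (PySem.List.pyGetD m r []) c 0

-- the n×n matrix whose (r,c) entry is g r c
def pvMatF (n : Int) (g : Int → Int → Int) : List (List Int) :=
  (PySem.List.pyRange 0 n 1).map (fun r => (PySem.List.pyRange 0 n 1).map (fun c => g r c))

-- "M is the submatrix of m picked out by rows/cols" (entries read with getD defaults)
def pvGood (m : List (List Int)) (M : List (List Int)) (rows cols : List Int) : Prop :=
  M.length = rows.length ∧ rows.length = cols.length ∧
  ∀ k, k < M.length → cols.length ≤ (M.getD k []).length ∧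
    ∀ j, j < cols.length → (M.getD k []).getD j 0 = pvE m (rows.getD k 0) (cols.getD j 0)

-- signed sum Σ_{i<k} (-1)^i u i
def pvSum (k : Nat) (u : Nat → Int) : Int :=
  ((List.range k).map (fun i => (-1 : Int) ^ i * u i)).sum

theorem pv_foldA (k : Nat) (u : Int → Int) (t : Int) :
    (PySem.List.pyRange 0 (k : Int) 1).foldl (fun d c => d + (-1 : Int) ^ c.toNat * u c) t
      = t + pvSum k (fun i => u i) := by
  induction k generalizing t with
  | zero => simp [pvSum, PySem.List.pyRange_one_eq_nil (by omega : (0:Int) ≤ 0)]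
  | succ k ih =>
    rw [show ((k + 1 : Nat) : Int) = (k : Int) + 1 by push_cast; ring,
      PySem.List.pyRange_one_succ_right (by omega), List.foldl_append, ih]
    simp [pvSum, List.range_succ]
    ring

theorem pv_foldB (k : Nat) (v : Int → Int) (t s : Int) :
    (PySem.List.pyRange 0 (k : Int) 1).foldl (fun (ts : Int × Int) i => (ts.1 + ts.2 * v i, -ts.2)) (t, s)
      = (t + s * pvSum k (fun i => v i), s * (-1 : Int) ^ k) := by
  induction k generalizing t s with
  | zero => simp [pvSum, PySem.List.pyRange_one_eq_nil (by omega : (0:Int) ≤ 0)]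
  | succ k ih =>
    rw [show ((k + 1 : Nat) : Int) = (k : Int) + 1 by push_cast; ring,
      PySem.List.pyRange_one_succ_right (by omega), List.foldl_append, ih]
    simp [pvSum, List.range_succ, List.foldl]
    constructor
    · ring
    · ring

theorem pvSum_congr {k : Nat} {u u' : Nat → Int} (h : ∀ i, i < k → u i = u' i) :
    pvSum k u = pvSum k u' := by
  unfold pvSum
  congr 1
  exact List.map_congr_left (fun i hi => by rw [h i (List.mem_range.1 hi)])

theorem pv_minor_erase (M : List (List Int)) (i j : Int) (hi : 0 ≤ i) (hj : 0 ≤ j) :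
    get_matrix_minor M i j = (M.eraseIdx i.toNat).map (fun row => row.eraseIdx j.toNat) := by
  unfold get_matrix_minor
  rw [PySem.List.slice_to M hi, PySem.List.slice_from M (by omega : 0 ≤ i + 1),
    show (i + 1).toNat = i.toNat + 1 by omega, ← List.eraseIdx_eq_take_drop_succ]
  congr 1
  funext row
  rw [PySem.List.slice_to row hj, PySem.List.slice_from row (by omega : 0 ≤ j + 1),
    show (j + 1).toNat = j.toNat + 1 by omega, ← List.eraseIdx_eq_take_drop_succ]

theorem pv_detA_expand (M : List (List Int)) (h3 : 3 ≤ M.length) :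
    calculate_determinant M
      = pvSum M.length (fun i => (M.getD 0 []).getD i 0
          * calculate_determinant (M.tail.map (fun row => row.eraseIdx i))) := by
  rw [calculate_determinant]
  rw [if_neg (by simp; omega), if_neg (by simp; omega)]
  rw [List.foldl_attach
    (f := fun determinant c => determinant + (-1 : Int) ^ c.toNat
      * PySem.List.pyGetD (PySem.List.pyGetD M 0 []) c 0
      * calculate_determinant (get_matrix_minor M 0 c))]
  simp only [mul_assoc]
  rw [pv_foldA M.length
    (fun c => PySem.List.pyGetD (PySem.List.pyGetD M 0 []) c 0
      * calculate_determinant (get_matrix_minor M 0 c)) 0, zero_add]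
  refine pvSum_congr (fun i hi => ?_)
  rw [pv_minor_erase M 0 (i : Int) (by omega) (by omega)]
  simp [PySem.List.pyGetD_zero, List.eraseIdx_zero]

theorem pv_detB_expand (m : List (List Int)) (rows cols : List Int) (h1 : rows.length ≠ 1) :
    det_idx m rows cols
      = pvSum cols.length (fun i => pvE m (rows.getD 0 0) (cols.getD i 0)
          * det_idx m rows.tail (cols.eraseIdx i)) := by
  rw [det_idx]
  rw [if_neg (by simpa using h1)]
  dsimp only
  rw [List.foldl_attach
    (f := fun (ts : Int × Int) i =>
      (ts.1 + ts.2 * PySem.List.pyGetD (PySem.List.pyGetD m (PySem.List.pyGetD rows 0 0) []) (PySem.List.pyGetD cols i 0) 0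
          * det_idx m (PySem.List.slice rows (some 1) none)
            (PySem.List.slice cols none (some i) ++ PySem.List.slice cols (some (i + 1)) none),
        -ts.2))]
  simp only [mul_assoc]
  rw [pv_foldB cols.length
    (fun i => PySem.List.pyGetD (PySem.List.pyGetD m (PySem.List.pyGetD rows 0 0) []) (PySem.List.pyGetD cols i 0) 0
      * det_idx m (PySem.List.slice rows (some 1) none)
        (PySem.List.slice cols none (some i) ++ PySem.List.slice cols (some (i + 1)) none)) 0 1]
  simp only [zero_add, one_mul]
  refine pvSum_congr (fun i hi => ?_)
  rw [PySem.List.slice_to cols (by omega : 0 ≤ (i : Int)),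
    PySem.List.slice_from cols (by omega : 0 ≤ (i : Int) + 1)]
  simp only [Int.toNat_natCast, show ((i : Int) + 1).toNat = i + 1 by omega]
  rw [← List.eraseIdx_eq_take_drop_succ, PySem.List.slice_from_one]
  simp [pvE, PySem.List.pyGetD_zero]

theorem pv_detB_single (m : List (List Int)) (rows cols : List Int) (h : rows.length = 1) :
    det_idx m rows cols = pvE m (rows.getD 0 0) (cols.getD 0 0) := by
  rw [det_idx, if_pos (by simpa using h)]
  simp [pvE, PySem.List.pyGetD_zero]

theorem pv_good_minor (m M : List (List Int)) (rows cols : List Int)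
    (hg : pvGood m M rows cols) (i : Nat) (hi : i < cols.length) :
    pvGood m (M.tail.map (fun row => row.eraseIdx i)) rows.tail (cols.eraseIdx i) := by
  obtain ⟨h1, h2, h3⟩ := hg
  refine ⟨by simp; omega, by simp [List.length_eraseIdx, hi]; omega, ?_⟩
  intro k hk
  simp only [List.length_map, List.length_tail] at hk
  have hk1 : k + 1 < M.length := by omega
  have hrow : (List.map (fun row => row.eraseIdx i) M.tail).getD k []
      = (M.getD (k + 1) []).eraseIdx i := by
    simp [List.getD_eq_getElem?_getD, List.getElem?_tail, hk1]
  obtain ⟨hlen, hent⟩ := h3 (k + 1) hk1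
  constructor
  · rw [hrow]
    simp only [List.length_eraseIdx]
    split_ifs <;> omega
  · intro j hj
    have hcl : (cols.eraseIdx i).length = cols.length - 1 := by
      simp [List.length_eraseIdx, hi]
    rw [hrow]
    have hrt : rows.tail.getD k 0 = rows.getD (k + 1) 0 := by
      simp [List.getD_eq_getElem?_getD, List.getElem?_tail]
    have hce : (cols.eraseIdx i).getD j 0 = if j < i then cols.getD j 0 else cols.getD (j + 1) 0 := by
      simp [List.getD_eq_getElem?_getD, List.getElem?_eraseIdx]
      split_ifs <;> rfl
    have hre : ((M.getD (k + 1) []).eraseIdx i).getD j 0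
        = if j < i then (M.getD (k + 1) []).getD j 0 else (M.getD (k + 1) []).getD (j + 1) 0 := by
      simp [List.getD_eq_getElem?_getD, List.getElem?_eraseIdx]
      split_ifs <;> rfl
    rw [hre, hce, hrt]
    split_ifs with hcase
    · exact hent j (by omega)
    · exact hent (j + 1) (by omega)

theorem pv_main (m : List (List Int)) (N : Nat) :
    ∀ (cols rows : List Int) (M : List (List Int)), cols.length = N → pvGood m M rows cols →
      calculate_determinant M = det_idx m rows cols := by
  induction N using Nat.strong_induction_on with
  | _ N ih =>
    intro cols rows M hN hg
    obtain ⟨h1, h2, h3⟩ := hg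
    match N, hN with
    | 0, hN =>
      have hM : M = [] := List.length_eq_zero_iff.1 (by omega)
      have hr : rows = [] := List.length_eq_zero_iff.1 (by omega)
      have hc : cols = [] := List.length_eq_zero_iff.1 hN
      subst hM; subst hr; subst hc
      rw [calculate_determinant, det_idx]
      simp only [List.length_nil]
      rw [show ((0:Nat):Int) = (0:Int) from rfl]
      rw [show (PySem.List.pyRange (0:Int) (0:Int) 1) = [] from by decide]
      simp
    | 1, hN =>
      obtain ⟨c, hc⟩ := List.length_eq_one_iff.1 hN
      obtain ⟨r, hr⟩ := List.length_eq_one_iff.1 (by omega : rows.length = 1)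
      obtain ⟨row, hM⟩ := List.length_eq_one_iff.1 (by omega : M.length = 1)
      have he := (h3 0 (by omega)).2 0 (by omega)
      rw [calculate_determinant, if_pos (by simp [hM]), pv_detB_single m rows cols (by omega)]
      rw [hM, hc, hr] at he ⊢
      simpa [PySem.List.pyGetD_zero] using he
    | 2, hN =>
      obtain ⟨c0, c1, hc⟩ := List.length_eq_two.1 hN
      obtain ⟨r0, r1, hr⟩ := List.length_eq_two.1 (by omega : rows.length = 2)
      obtain ⟨row0, row1, hM⟩ := List.length_eq_two.1 (by omega : M.length = 2)
      have e00 := (h3 0 (by omega)).2 0 (by omega)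
      have e01 := (h3 0 (by omega)).2 1 (by omega)
      have e10 := (h3 1 (by omega)).2 0 (by omega)
      have e11 := (h3 1 (by omega)).2 1 (by omega)
      subst hM; subst hc; subst hr
      simp only [List.getD_cons_zero, List.getD_cons_succ] at e00 e01 e10 e11
      rw [pv_detB_expand m [r0, r1] [c0, c1] (by simp)]
      rw [calculate_determinant, if_neg (by simp), if_pos (by simp)]
      have hb1 : det_idx m [r0, r1].tail ([c0, c1].eraseIdx 0) = pvE m r1 c1 := by
        rw [pv_detB_single m _ _ (by simp)]; rfl
      have hb0 : det_idx m [r0, r1].tail ([c0, c1].eraseIdx 1) = pvE m r1 c0 := by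
        rw [pv_detB_single m _ _ (by simp)]; rfl
      have hsum : pvSum ([c0, c1].length) (fun i => pvE m ([r0, r1].getD 0 0) ([c0, c1].getD i 0)
          * det_idx m [r0, r1].tail ([c0, c1].eraseIdx i))
          = pvE m r0 c0 * pvE m r1 c1 - pvE m r0 c1 * pvE m r1 c0 := by
        simp only [List.length_cons, List.length_nil, pvSum, List.range_succ, List.range_zero,
          List.map_cons, List.map_nil, List.sum_cons, List.sum_nil, List.nil_append,
          List.singleton_append, hb0, hb1]
        simp only [List.getD_cons_zero, List.getD_cons_succ]
        ring
      rw [hsum]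
      simp only [PySem.List.pyGetD_ofNat', List.getD_cons_zero, List.getD_cons_succ]
      rw [e00, e01, e10, e11]
    | (N + 3), hN =>
      rw [pv_detA_expand M (by omega), pv_detB_expand m rows cols (by omega), h1, h2, hN]
      refine pvSum_congr (fun i hi => ?_)
      have he := (h3 0 (by omega)).2 i (by omega)
      rw [he]
      congr 1
      have hi' : i < cols.length := by omega
      exact ih (N + 2) (by omega) (cols.eraseIdx i) rows.tail (M.tail.map (fun row => row.eraseIdx i))
        (by simp [List.length_eraseIdx, hi']; omega)
        (pv_good_minor m M rows cols ⟨h1, h2, h3⟩ i hi')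

theorem pv_range_getD (n : Int) (k : Nat) (hk : (k : Int) < n) :
    (PySem.List.pyRange 0 n 1).getD k 0 = (k : Int) := by
  have hlen : k < (PySem.List.pyRange 0 n 1).length := by
    rw [PySem.List.length_pyRange_one]; omega
  rw [List.getD_eq_getElem?_getD, List.getElem?_eq_getElem hlen,
    PySem.List.getElem_pyRange_one 0 n k hlen]
  simp

theorem pv_filter_range (n r : Int) (h0 : 0 ≤ r) (hr : r < n) :
    (PySem.List.pyRange 0 n 1).filter (fun i => i != r)
      = PySem.List.pyRange 0 r 1 ++ PySem.List.pyRange (r + 1) n 1 := by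
  rw [PySem.List.pyRange_one_append 0 r n h0 (le_of_lt hr), PySem.List.pyRange_one_cons hr,
    List.filter_append, List.filter_cons]
  rw [List.filter_eq_self.2 (fun x hx => by
    have := PySem.List.mem_pyRange_one.1 hx; simp; omega)]
  rw [List.filter_eq_self.2 (fun x hx => by
    have := PySem.List.mem_pyRange_one.1 hx; simp; omega)]
  simp

theorem pv_filter_range_len (n r : Int) (h0 : 0 ≤ r) (hr : r < n) :
    ((PySem.List.pyRange 0 n 1).filter (fun i => i != r)).length = n.toNat - 1 := by
  rw [pv_filter_range n r h0 hr]
  simp [PySem.List.length_pyRange_one]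
  omega

theorem pv_filter_range_getD (n r : Int) (k : Nat) (h0 : 0 ≤ r) (hr : r < n)
    (hk : (k : Int) < n - 1) :
    ((PySem.List.pyRange 0 n 1).filter (fun i => i != r)).getD k 0
      = if (k : Int) < r then (k : Int) else (k : Int) + 1 := by
  rw [pv_filter_range n r h0 hr]
  by_cases hcase : (k : Int) < r
  · rw [List.getD_append _ _ _ _ (by rw [PySem.List.length_pyRange_one]; omega),
      pv_range_getD r k hcase, if_pos hcase]
  · rw [List.getD_append_right _ _ _ _ (by rw [PySem.List.length_pyRange_one]; omega),
      if_neg hcase]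
    have hlen : k - (PySem.List.pyRange 0 r 1).length < (PySem.List.pyRange (r + 1) n 1).length := by
      rw [PySem.List.length_pyRange_one, PySem.List.length_pyRange_one]; omega
    rw [List.getD_eq_getElem?_getD, List.getElem?_eq_getElem hlen,
      PySem.List.getElem_pyRange_one (r + 1) n _ hlen]
    simp [PySem.List.length_pyRange_one]
    omega

theorem pv_mem_len (matrix : List (List Int)) (hPre : ∀ row ∈ matrix, matrix.length ≤ row.length)
    (k : Nat) (hk : k < matrix.length) : matrix.length ≤ (matrix.getD k []).length := by
  have : matrix.getD k [] ∈ matrix := by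
    rw [List.getD_eq_getElem?_getD, List.getElem?_eq_getElem hk]
    exact List.getElem_mem hk
  exact hPre _ this

theorem pv_det_top (matrix : List (List Int))
    (hPre : ∀ row ∈ matrix, matrix.length ≤ row.length) :
    calculate_determinant matrix
      = det_idx matrix (PySem.List.pyRange 0 (matrix.length : Int) 1)
          (PySem.List.pyRange 0 (matrix.length : Int) 1) := by
  refine pv_main matrix matrix.length _ _ _ (by simp [PySem.List.length_pyRange_one]) ?_
  refine ⟨by simp [PySem.List.length_pyRange_one], by simp, ?_⟩
  intro k hk
  have hlr : (PySem.List.pyRange 0 (matrix.length : Int) 1).length = matrix.length := by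
    simp [PySem.List.length_pyRange_one]
  constructor
  · rw [hlr]; exact pv_mem_len matrix hPre k hk
  · intro j hj
    rw [hlr] at hj
    rw [pv_range_getD _ k (by omega), pv_range_getD _ j (by omega)]
    simp [pvE]

theorem pv_sign (a : Int) (h : 0 ≤ a) :
    (-1 : Int) ^ a.toNat = if PySem.Int.mod a 2 == 0 then 1 else -1 := by
  rw [PySem.Int.mod_eq_emod_of_pos (by omega : (0:Int) < 2)]
  obtain ⟨k, rfl⟩ : ∃ k : Nat, a = (k : Int) := ⟨a.toNat, by omega⟩
  rw [Int.toNat_natCast]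
  rcases Nat.even_or_odd k with he | ho
  · rw [he.neg_one_pow, if_pos (by rw [Nat.even_iff] at he; simp only [beq_iff_eq]; omega)]
  · rw [ho.neg_one_pow, if_neg (by rw [Nat.odd_iff] at ho; simp only [beq_iff_eq]; omega)]

theorem pvE_cast (m : List (List Int)) (i j : Nat) :
    pvE m (i : Int) (j : Int) = (m.getD i []).getD j 0 := by
  simp [pvE]

theorem pv_cof (matrix : List (List Int)) (hPre : ∀ row ∈ matrix, matrix.length ≤ row.length)
    (r c : Int) (hr0 : 0 ≤ r) (hr : r < (matrix.length : Int))
    (hc0 : 0 ≤ c) (hc : c < (matrix.length : Int)) :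
    calculate_determinant (get_matrix_minor matrix r c)
      = det_idx matrix
          ((PySem.List.pyRange 0 (matrix.length : Int) 1).filter (fun i => i != r))
          ((PySem.List.pyRange 0 (matrix.length : Int) 1).filter (fun j => j != c)) := by
  rw [pv_minor_erase matrix r c hr0 hc0]
  refine pv_main matrix (matrix.length - 1) _ _ _
    (by rw [pv_filter_range_len _ c hc0 hc]; omega) ?_
  have hrl := pv_filter_range_len (matrix.length : Int) r hr0 hr
  have hcl := pv_filter_range_len (matrix.length : Int) c hc0 hc
  refine ⟨?_, by omega, ?_⟩
  · simp [List.length_eraseIdx, hrl]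
    omega
  · intro k hk
    simp only [List.length_map, List.length_eraseIdx] at hk
    have hk' : k < matrix.length - 1 := by
      rcases hk with hk; split at hk <;> omega
    have hidx : ∀ (kk : Nat), kk < matrix.length - 1 →
        (List.map (fun row => row.eraseIdx c.toNat) (matrix.eraseIdx r.toNat)).getD kk []
          = (matrix.getD (if kk < r.toNat then kk else kk + 1) []).eraseIdx c.toNat := by
      intro kk hkk
      have hrn : r.toNat < matrix.length := by omega
      simp only [List.getD_eq_getElem?_getD, List.getElem?_map, List.getElem?_eraseIdx]
      split_ifs with h1
      · rw [List.getElem?_eq_getElem (show kk < matrix.length by omega)]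
        simp
      · rw [List.getElem?_eq_getElem (show kk + 1 < matrix.length by omega)]
        simp
    rw [hidx k hk']
    set row := matrix.getD (if k < r.toNat then k else k + 1) [] with hrow
    have hrowlen : matrix.length ≤ row.length :=
      pv_mem_len matrix hPre _ (by split <;> omega)
    constructor
    · simp only [List.length_eraseIdx]
      rw [hcl]
      split_ifs <;> omega
    · intro j hj
      rw [hcl] at hj
      rw [pv_filter_range_getD _ r k hr0 hr (by omega),
        pv_filter_range_getD _ c j hc0 hc (by omega)]
      have hre : (row.eraseIdx c.toNat).getD j 0
          = if j < c.toNat then row.getD j 0 else row.getD (j + 1) 0 := by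
        simp only [List.getD_eq_getElem?_getD, List.getElem?_eraseIdx]
        split_ifs <;> rfl
      rw [hre]
      have hA : (if (k : Int) < r then (k : Int) else (k : Int) + 1)
          = ((if k < r.toNat then k else k + 1 : Nat) : Int) := by
        split_ifs <;> push_cast <;> omega
      have hB : (if (j : Int) < c then (j : Int) else (j : Int) + 1)
          = ((if j < c.toNat then j else j + 1 : Nat) : Int) := by
        split_ifs <;> push_cast <;> omega
      rw [hA, hB, pvE_cast, ← hrow]
      split_ifs <;> rfl

def pvUpd (g : Int → Int → Int) (r c : Int) (v : Int) : Int → Int → Int :=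
  fun x y => if x = r ∧ y = c then v else g x y

def pvSwapped (g : Int → Int → Int) (r c : Int) : Int → Int → Int :=
  pvUpd (pvUpd g r c (g c r)) c r (g r c)

theorem pv_swap_compose (g : Int → Int → Int) (r c x y : Int) (hrc : r ≤ c) :
    (if (x = r ∧ c + 1 ≤ y) ∨ (y = r ∧ c + 1 ≤ x) then pvSwapped g r c y x else pvSwapped g r c x y)
    = (if (x = r ∧ c ≤ y) ∨ (y = r ∧ c ≤ x) then g y x else g x y) := by
  simp only [pvSwapped, pvUpd]
  split_ifs <;> first | rfl | omega | simp_all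

theorem pv_matF_congr (n : Int) (g g' : Int → Int → Int)
    (h : ∀ x y, 0 ≤ x → x < n → 0 ≤ y → y < n → g x y = g' x y) : pvMatF n g = pvMatF n g' := by
  unfold pvMatF
  refine List.map_congr_left (fun r hr => ?_)
  have hrb := PySem.List.mem_pyRange_one.1 hr
  exact List.map_congr_left (fun c hc => by
    have hcb := PySem.List.mem_pyRange_one.1 hc
    exact h r c hrb.1 hrb.2 hcb.1 hcb.2)

theorem pv_build (n : Int) (f : Int → Int → Int) :
    (PySem.List.pyRange 0 n 1).foldl
      (fun cof r => cof ++ [(PySem.List.pyRange 0 n 1).foldl (fun row c => row ++ [f r c]) []]) []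
    = pvMatF n f := by
  rw [PySem.List.foldl_append_singleton_eq_map]
  simp only [List.nil_append, pvMatF]
  exact List.map_congr_left (fun r _ => by
    rw [PySem.List.foldl_append_singleton_eq_map]; simp)

theorem pv_getRow (n : Int) (g : Int → Int → Int) (r : Int) (h0 : 0 ≤ r) (h1 : r < n) :
    PySem.List.pyGetD (pvMatF n g) r [] = (PySem.List.pyRange 0 n 1).map (g r) :=
  PySem.List.pyGetD_map_pyRange_of_nonneg (fun r => (PySem.List.pyRange 0 n 1).map (g r)) n r [] h0 h1

theorem pv_getE (n : Int) (g : Int → Int → Int) (r c : Int)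
    (hr0 : 0 ≤ r) (hr : r < n) (hc0 : 0 ≤ c) (hc : c < n) :
    PySem.List.pyGetD (PySem.List.pyGetD (pvMatF n g) r []) c 0 = g r c := by
  rw [pv_getRow n g r hr0 hr]
  exact PySem.List.pyGetD_map_pyRange_of_nonneg (g r) n c 0 hc0 hc

theorem pv_set_map {β : Type} (n : Int) (f : Int → β) (k : Int) (w : β)
    (hk0 : 0 ≤ k) (_hk : k < n) :
    ((PySem.List.pyRange 0 n 1).map f).set k.toNat w
      = (PySem.List.pyRange 0 n 1).map (fun x => if x = k then w else f x) := by
  refine List.ext_getElem (by simp) ?_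
  intro i h1 h2
  simp only [List.getElem_set, List.getElem_map]
  have hi : i < (PySem.List.pyRange 0 n 1).length := by simpa using h2
  rw [PySem.List.getElem_pyRange_one 0 n i hi]
  by_cases hik : k.toNat = i
  · rw [if_pos hik, if_pos (by omega)]
  · rw [if_neg hik, if_neg (by omega)]

theorem pv_set (n : Int) (g : Int → Int → Int) (r c v : Int)
    (hr0 : 0 ≤ r) (hr : r < n) (hc0 : 0 ≤ c) (hc : c < n) :
    PySem.List.pySetD (pvMatF n g) r
      (PySem.List.pySetD (PySem.List.pyGetD (pvMatF n g) r []) c v)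
    = pvMatF n (pvUpd g r c v) := by
  rw [pv_getRow n g r hr0 hr, PySem.List.pySetD_of_nonneg _ _ hc0,
    pv_set_map n (g r) c v hc0 hc]
  rw [show pvMatF n g = ((PySem.List.pyRange 0 n 1).map (fun x => (PySem.List.pyRange 0 n 1).map (g x))) from rfl]
  rw [PySem.List.pySetD_of_nonneg _ _ hr0,
    pv_set_map n (fun x => (PySem.List.pyRange 0 n 1).map (g x)) r _ hr0 hr]
  unfold pvMatF pvUpd
  refine List.map_congr_left (fun x hx => ?_)
  by_cases hxr : x = r
  · rw [if_pos hxr]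
    exact List.map_congr_left (fun y hy => by
      by_cases hyc : y = c
      · rw [if_pos hyc, if_pos ⟨hxr, hyc⟩]
      · rw [if_neg hyc, if_neg (by tauto), hxr])
  · rw [if_neg hxr]
    exact List.map_congr_left (fun y hy => by rw [if_neg (by tauto)])

theorem pv_swap_step (n : Int) (g : Int → Int → Int) (r c : Int)
    (hr0 : 0 ≤ r) (hrn : r < n) (hc0 : 0 ≤ c) (hcn : c < n) :
    PySem.List.pySetD
      (PySem.List.pySetD (pvMatF n g) r
        (PySem.List.pySetD (PySem.List.pyGetD (pvMatF n g) r []) c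
          (PySem.List.pyGetD (PySem.List.pyGetD (pvMatF n g) c []) r 0)))
      c
      (PySem.List.pySetD
        (PySem.List.pyGetD
          (PySem.List.pySetD (pvMatF n g) r
            (PySem.List.pySetD (PySem.List.pyGetD (pvMatF n g) r []) c
              (PySem.List.pyGetD (PySem.List.pyGetD (pvMatF n g) c []) r 0)))
          c [])
        r (PySem.List.pyGetD (PySem.List.pyGetD (pvMatF n g) r []) c 0))
    = pvMatF n (pvSwapped g r c) := by
  rw [pv_getE n g c r hc0 hcn hr0 hrn, pv_getE n g r c hr0 hrn hc0 hcn]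
  rw [pv_set n g r c (g c r) hr0 hrn hc0 hcn]
  rw [pv_set n (pvUpd g r c (g c r)) c r (g r c) hc0 hcn hr0 hrn]
  rfl

theorem pv_trans_inner (n r : Int) (hr0 : 0 ≤ r) (hrn : r < n) :
    ∀ (fuel : Nat) (c : Int) (g : Int → Int → Int), r ≤ c → (n - c).toNat = fuel →
    (PySem.List.pyRange c n 1).foldl
      (fun cofactors c =>
        let x := PySem.List.pyGetD (PySem.List.pyGetD cofactors r []) c 0
        let y := PySem.List.pyGetD (PySem.List.pyGetD cofactors c []) r 0
        let cofactors := PySem.List.pySetD cofactors r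
          (PySem.List.pySetD (PySem.List.pyGetD cofactors r []) c y)
        PySem.List.pySetD cofactors c
          (PySem.List.pySetD (PySem.List.pyGetD cofactors c []) r x))
      (pvMatF n g)
    = pvMatF n (fun x y => if (x = r ∧ c ≤ y) ∨ (y = r ∧ c ≤ x) then g y x else g x y) := by
  intro fuel
  induction fuel with
  | zero =>
    intro c g hc hfuel
    rw [PySem.List.pyRange_one_eq_nil (by omega), List.foldl_nil]
    exact pv_matF_congr n _ _ (fun x y hx0 hxn hy0 hyn => by rw [if_neg (by omega)])
  | succ fuel ih =>
    intro c g hc hfuel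
    rw [PySem.List.pyRange_one_cons (by omega : c < n), List.foldl_cons]
    dsimp only
    rw [pv_swap_step n g r c hr0 hrn (by omega) (by omega)]
    rw [ih (c + 1) (pvSwapped g r c) (by omega) (by omega)]
    exact pv_matF_congr n _ _ (fun x y hx0 hxn hy0 hyn => pv_swap_compose g r c x y hc)

theorem pv_trans_outer (n : Int) :
    ∀ (fuel : Nat) (r : Int) (g : Int → Int → Int), 0 ≤ r → (n - r).toNat = fuel →
    (PySem.List.pyRange r n 1).foldl
      (fun cofactors r =>
        (PySem.List.pyRange r n 1).foldl
          (fun cofactors c =>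
            let x := PySem.List.pyGetD (PySem.List.pyGetD cofactors r []) c 0
            let y := PySem.List.pyGetD (PySem.List.pyGetD cofactors c []) r 0
            let cofactors := PySem.List.pySetD cofactors r
              (PySem.List.pySetD (PySem.List.pyGetD cofactors r []) c y)
            PySem.List.pySetD cofactors c
              (PySem.List.pySetD (PySem.List.pyGetD cofactors c []) r x))
          cofactors)
      (pvMatF n g)
    = pvMatF n (fun x y => if r ≤ x ∧ r ≤ y then g y x else g x y) := by
  intro fuel
  induction fuel with
  | zero =>
    intro r g hr0 hfuel
    rw [PySem.List.pyRange_one_eq_nil (by omega), List.foldl_nil]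
    exact pv_matF_congr n _ _ (fun x y hx0 hxn hy0 hyn => by rw [if_neg (by omega)])
  | succ fuel ih =>
    intro r g hr0 hfuel
    rw [PySem.List.pyRange_one_cons (by omega : r < n), List.foldl_cons]
    dsimp only
    rw [pv_trans_inner n r hr0 (by omega) (n - r).toNat r g (le_refl r) rfl]
    rw [ih (r + 1) _ (by omega) (by omega)]
    refine pv_matF_congr n _ _ (fun x y hx0 hxn hy0 hyn => ?_)
    split_ifs <;> first | rfl | omega

theorem pvUpd_self (g : Int → Int → Int) (r c v : Int) : pvUpd g r c v r c = v := by
  simp [pvUpd]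

theorem pv_norm_step (n : Int) (g : Int → Int → Int) (r c dinv M : Int)
    (hr0 : 0 ≤ r) (hrn : r < n) (hc0 : 0 ≤ c) (hcn : c < n) :
    PySem.List.pySetD
      (PySem.List.pySetD (pvMatF n g) r
        (PySem.List.pySetD (PySem.List.pyGetD (pvMatF n g) r []) c
          (PySem.Int.mod (PySem.List.pyGetD (PySem.List.pyGetD (pvMatF n g) r []) c 0 * dinv) M)))
      r
      (PySem.List.pySetD
        (PySem.List.pyGetD
          (PySem.List.pySetD (pvMatF n g) r
            (PySem.List.pySetD (PySem.List.pyGetD (pvMatF n g) r []) c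
              (PySem.Int.mod (PySem.List.pyGetD (PySem.List.pyGetD (pvMatF n g) r []) c 0 * dinv) M)))
          r [])
        c
        (PySem.Int.mod
          (PySem.List.pyGetD
            (PySem.List.pyGetD
              (PySem.List.pySetD (pvMatF n g) r
                (PySem.List.pySetD (PySem.List.pyGetD (pvMatF n g) r []) c
                  (PySem.Int.mod (PySem.List.pyGetD (PySem.List.pyGetD (pvMatF n g) r []) c 0 * dinv) M)))
              r [])
            c 0)
          M))
    = pvMatF n (pvUpd g r c (PySem.Int.mod (PySem.Int.mod (g r c * dinv) M) M)) := by
  rw [pv_getE n g r c hr0 hrn hc0 hcn]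
  rw [pv_set n g r c _ hr0 hrn hc0 hcn]
  rw [pv_getE n (pvUpd g r c (PySem.Int.mod (g r c * dinv) M)) r c hr0 hrn hc0 hcn]
  rw [pv_set n (pvUpd g r c (PySem.Int.mod (g r c * dinv) M)) r c _ hr0 hrn hc0 hcn]
  rw [pvUpd_self]
  refine pv_matF_congr n _ _ (fun x y hx0 hxn hy0 hyn => ?_)
  simp only [pvUpd]
  split_ifs <;> rfl

theorem pv_norm_inner (n r dinv M : Int) (hr0 : 0 ≤ r) (hrn : r < n) :
    ∀ (fuel : Nat) (c : Int) (g : Int → Int → Int), 0 ≤ c → (n - c).toNat = fuel →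
    (PySem.List.pyRange c n 1).foldl
      (fun cofactors c =>
        let v := PySem.Int.mod (PySem.List.pyGetD (PySem.List.pyGetD cofactors r []) c 0 * dinv) M
        let cofactors := PySem.List.pySetD cofactors r
          (PySem.List.pySetD (PySem.List.pyGetD cofactors r []) c v)
        let v2 := PySem.Int.mod (PySem.List.pyGetD (PySem.List.pyGetD cofactors r []) c 0) M
        PySem.List.pySetD cofactors r
          (PySem.List.pySetD (PySem.List.pyGetD cofactors r []) c v2))
      (pvMatF n g)
    = pvMatF n (fun x y =>
        if x = r ∧ c ≤ y then PySem.Int.mod (PySem.Int.mod (g x y * dinv) M) M else g x y) := by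
  intro fuel
  induction fuel with
  | zero =>
    intro c g hc0 hfuel
    rw [PySem.List.pyRange_one_eq_nil (by omega), List.foldl_nil]
    exact pv_matF_congr n _ _ (fun x y hx0 hxn hy0 hyn => by rw [if_neg (by omega)])
  | succ fuel ih =>
    intro c g hc0 hfuel
    rw [PySem.List.pyRange_one_cons (by omega : c < n), List.foldl_cons]
    dsimp only
    rw [pv_norm_step n g r c dinv M hr0 hrn (by omega) (by omega)]
    rw [ih (c + 1) _ (by omega) (by omega)]
    refine pv_matF_congr n _ _ (fun x y hx0 hxn hy0 hyn => ?_)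
    simp only [pvUpd]
    split_ifs <;> first | rfl | omega | simp_all

theorem pv_norm_outer (n dinv M : Int) :
    ∀ (fuel : Nat) (r : Int) (g : Int → Int → Int), 0 ≤ r → (n - r).toNat = fuel →
    (PySem.List.pyRange r n 1).foldl
      (fun cofactors r =>
        (PySem.List.pyRange 0 n 1).foldl
          (fun cofactors c =>
            let v := PySem.Int.mod (PySem.List.pyGetD (PySem.List.pyGetD cofactors r []) c 0 * dinv) M
            let cofactors := PySem.List.pySetD cofactors r
              (PySem.List.pySetD (PySem.List.pyGetD cofactors r []) c v)
            let v2 := PySem.Int.mod (PySem.List.pyGetD (PySem.List.pyGetD cofactors r []) c 0) M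
            PySem.List.pySetD cofactors r
              (PySem.List.pySetD (PySem.List.pyGetD cofactors r []) c v2))
          cofactors)
      (pvMatF n g)
    = pvMatF n (fun x y =>
        if r ≤ x then PySem.Int.mod (PySem.Int.mod (g x y * dinv) M) M else g x y) := by
  intro fuel
  induction fuel with
  | zero =>
    intro r g hr0 hfuel
    rw [PySem.List.pyRange_one_eq_nil (show n ≤ r by omega), List.foldl_nil]
    exact pv_matF_congr n _ _ (fun x y hx0 hxn hy0 hyn => by rw [if_neg (by omega)])
  | succ fuel ih =>
    intro r g hr0 hfuel
    rw [PySem.List.pyRange_one_cons (by omega : r < n), List.foldl_cons]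
    dsimp only
    rw [pv_norm_inner n r dinv M hr0 (by omega) n.toNat 0 g (le_refl 0) (by omega)]
    rw [ih (r + 1) _ (by omega) (by omega)]
    refine pv_matF_congr n _ _ (fun x y hx0 hxn hy0 hyn => ?_)
    split_ifs <;> first | rfl | omega

theorem pv_mod_idem (a b : Int) : PySem.Int.mod (PySem.Int.mod a b) b = PySem.Int.mod a b := by
  show (a.fmod b).fmod b = a.fmod b
  exact Int.fmod_fmod a b


-- ---- B-side: the signed-permutation table ----

theorem pv_sum_flatMap {α : Type} (l : List α) (f : α → List Int) :
    (l.flatMap f).sum = (l.map (fun x => (f x).sum)).sum := by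
  induction l with
  | nil => simp
  | cons x xs ih => simp [List.flatMap_cons, ih]

theorem pv_erase_slice (l : List Int) (k : Int) (hk : 0 ≤ k) :
    PySem.List.slice l none (some k) ++ PySem.List.slice l (some (k + 1)) none
      = l.eraseIdx k.toNat := by
  rw [PySem.List.slice_to l hk, PySem.List.slice_from l (by omega : 0 ≤ k + 1),
    show (k + 1).toNat = k.toNat + 1 by omega, ← List.eraseIdx_eq_take_drop_succ]

theorem pv_sp_nil : signed_perms [] = [([], 1)] := by
  rw [signed_perms]; rfl

theorem pv_foldSP (sub : Int → List (List Int × Int)) (head : Int → Int) :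
    ∀ (K : Nat) (l : List (List Int × Int)) (s : Int),
    (PySem.List.pyRange 0 (K : Int) 1).foldl
      (fun acc k => (acc.1 ++ (sub k).map (fun rs => (head k :: rs.1, acc.2 * rs.2)), -acc.2))
      (l, s)
    = (l ++ (List.range K).flatMap
        (fun (k : Nat) => (sub (k : Int)).map (fun rs => (head (k : Int) :: rs.1, s * (-1 : Int) ^ k * rs.2))),
       s * (-1 : Int) ^ K) := by
  intro K
  induction K with
  | zero =>
    intro l s
    simp [PySem.List.pyRange_one_eq_nil (by omega : (0:Int) ≤ 0)]
  | succ K ih =>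
    intro l s
    rw [show ((K + 1 : Nat) : Int) = (K : Int) + 1 by push_cast; ring,
      PySem.List.pyRange_one_succ_right (by omega), List.foldl_append, ih]
    simp only [List.foldl_cons, List.foldl_nil, List.range_succ, List.flatMap_append,
      List.flatMap_cons, List.flatMap_nil, List.append_nil, List.append_assoc, pow_succ]
    rw [Prod.mk.injEq]
    exact ⟨rfl, by ring⟩

theorem pv_sp_cons (items : List Int) (h : items ≠ []) :
    signed_perms items
      = (List.range items.length).flatMap
          (fun (k : Nat) => (signed_perms (items.eraseIdx k)).map
            (fun rs => (items.getD k 0 :: rs.1, (-1 : Int) ^ k * rs.2))) := by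
  rw [signed_perms, if_neg (by simpa using h)]
  rw [List.foldl_attach
    (f := fun (acc : List (List Int × Int) × Int) k =>
      (acc.1 ++ (signed_perms (PySem.List.slice items none (some k) ++ PySem.List.slice items (some (k + 1)) none)).map
          (fun rs => (PySem.List.pyGetD items k 0 :: rs.1, acc.2 * rs.2)),
       -acc.2))]
  rw [pv_foldSP
    (fun k => signed_perms (PySem.List.slice items none (some k) ++ PySem.List.slice items (some (k + 1)) none))
    (fun k => PySem.List.pyGetD items k 0) items.length [] 1]
  simp only [List.nil_append, one_mul]
  rw [List.flatMap_def, List.flatMap_def]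
  congr 1
  refine List.map_congr_left (fun k hk => ?_)
  rw [pv_erase_slice items (k : Int) (by omega)]
  simp only [PySem.List.pyGetD_natCast, List.getD_eq_getElem?_getD, Int.reduceNeg,
    Int.toNat_natCast]

-- the Leibniz product of one permutation (positions t = 0 .. rows.length-1)
def pvP (m : List (List Int)) (rows cols p : List Int) : Int :=
  ((List.range rows.length).map
    (fun (t : Nat) => PySem.List.pyGetD (PySem.List.pyGetD m (PySem.List.pyGetD rows (t : Int) 0) [])
        (PySem.List.pyGetD cols (PySem.List.pyGetD p (t : Int) 0) 0) 0)).prod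

theorem pv_foldProd (k : Nat) (u : Int → Int) (s : Int) :
    (PySem.List.pyRange 0 (k : Int) 1).foldl (fun prod t => prod * u t) s
      = s * ((List.range k).map (fun (t : Nat) => u (t : Int))).prod := by
  induction k generalizing s with
  | zero => simp [PySem.List.pyRange_one_eq_nil (by omega : (0:Int) ≤ 0)]
  | succ k ih =>
    rw [show ((k + 1 : Nat) : Int) = (k : Int) + 1 by push_cast; ring,
      PySem.List.pyRange_one_succ_right (by omega), List.foldl_append, ih]
    simp [List.range_succ]
    ring

theorem pv_detperm (m : List (List Int)) (rows cols : List Int) (perms : List (List Int × Int)) :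
    det_perm m rows cols perms = (perms.map (fun ps => ps.2 * pvP m rows cols ps.1)).sum := by
  unfold det_perm
  rw [PySem.List.foldl_add]
  rw [zero_add]
  congr 1
  refine List.map_congr_left (fun ps _ => ?_)
  exact pv_foldProd rows.length _ ps.2

theorem pv_pvP_cons (m : List (List Int)) (r0 h : Int) (rt cols pt : List Int) :
    pvP m (r0 :: rt) cols (h :: pt)
      = PySem.List.pyGetD (PySem.List.pyGetD m r0 []) (PySem.List.pyGetD cols h 0) 0
          * pvP m rt cols pt := by
  unfold pvP
  rw [List.length_cons, List.range_succ_eq_map]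
  rw [List.map_cons, List.prod_cons, List.map_map]
  congr 1
  · simp
  · congr 1
    refine List.map_congr_left (fun t _ => ?_)
    have hc : ((t : Int) + 1) = ((t + 1 : Nat) : Int) := by push_cast; ring
    simp only [Function.comp, hc, PySem.List.pyGetD_natCast, List.getD_cons_succ]

-- Leibniz sum over the table = reference Laplace expansion
theorem pv_leib (m : List (List Int)) (cols : List Int) :
    ∀ (N : Nat) (items rows : List Int), 1 ≤ N → items.length = N → rows.length = N →
    ((signed_perms items).map (fun ps => ps.2 * pvP m rows cols ps.1)).sum
      = det_idx m rows (items.map (fun i => PySem.List.pyGetD cols i 0)) := by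
  intro N
  induction N using Nat.strong_induction_on with
  | _ N ih =>
    intro items rows h1 hitems hrows
    match N, h1 with
    | 1, _ =>
      obtain ⟨i0, hi0⟩ := List.length_eq_one_iff.1 hitems
      obtain ⟨r0, hr0⟩ := List.length_eq_one_iff.1 hrows
      subst hi0; subst hr0
      rw [pv_sp_cons [i0] (by simp)]
      simp only [List.length_cons, List.length_nil, List.range_one, List.flatMap_cons,
        List.flatMap_nil, List.eraseIdx_cons_zero, pv_sp_nil, List.map_cons, List.map_nil,
        List.append_nil, List.sum_cons, List.sum_nil, List.getD_cons_zero, pow_zero, one_mul]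
      rw [pv_detB_single m [r0] _ (by simp)]
      simp [pv_sp_nil, pvP, pvE, PySem.List.pyGetD_zero]
    | (N + 2), _ =>
      have hne : items ≠ [] := by
        intro hc; rw [hc] at hitems; simp at hitems
      obtain ⟨r0, rt, hr⟩ : ∃ r0 rt, rows = r0 :: rt := by
        cases rows with
        | nil => simp at hrows
        | cons a b => exact ⟨a, b, rfl⟩
      rw [pv_sp_cons items hne, List.map_flatMap, pv_sum_flatMap]
      rw [pv_detB_expand m rows (items.map (fun i => PySem.List.pyGetD cols i 0))
        (by rw [hrows]; omega)]
      unfold pvSum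
      rw [List.length_map, hitems]
      congr 1
      refine List.map_congr_left (fun k hk => ?_)
      have hklt : k < items.length := by rw [hitems]; exact List.mem_range.1 hk
      rw [List.map_map]
      have hstep : ∀ rs : List Int × Int,
          ((fun ps => ps.2 * pvP m rows cols ps.1) ∘
            (fun rs => (items.getD k 0 :: rs.1, (-1 : Int) ^ k * rs.2))) rs
          = ((-1 : Int) ^ k
              * PySem.List.pyGetD (PySem.List.pyGetD m r0 []) (PySem.List.pyGetD cols (items.getD k 0) 0) 0)
            * (rs.2 * pvP m rt cols rs.1) := by
        intro rs
        simp only [Function.comp, hr, pv_pvP_cons]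
        ring
      rw [List.map_congr_left (fun rs _ => hstep rs), PySem.List.sum_map_const_mul_int]
      dsimp only
      rw [ih (N + 1) (by omega) (items.eraseIdx k) rt (by omega)
        (by rw [List.length_eraseIdx_of_lt hklt, hitems]; omega)
        (by have := hrows; rw [hr] at this; simp at this; omega)]
      rw [← List.eraseIdx_map (fun i => PySem.List.pyGetD cols i 0) items k]
      have hgetD : (items.map (fun i => PySem.List.pyGetD cols i 0)).getD k 0
          = PySem.List.pyGetD cols (items.getD k 0) 0 := by
        rw [List.getD_eq_getElem?_getD, List.getElem?_map,
          List.getElem?_eq_getElem hklt]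
        simp [List.getD_eq_getElem?_getD, List.getElem?_eq_getElem hklt]
      rw [hgetD]
      have hrt : rows.tail = rt := by rw [hr]; rfl
      have hE : pvE m (rows.getD 0 0) (PySem.List.pyGetD cols (items.getD k 0) 0)
          = PySem.List.pyGetD (PySem.List.pyGetD m r0 []) (PySem.List.pyGetD cols (items.getD k 0) 0) 0 := by
        rw [hr]; simp [pvE, PySem.List.pyGetD_zero]
      rw [hrt, hE]
      ring

theorem pv_detperm_eq (m : List (List Int)) (rows cols items : List Int)
    (h1 : 1 ≤ items.length) (h2 : rows.length = items.length) :
    det_perm m rows cols (signed_perms items)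
      = det_idx m rows (items.map (fun i => PySem.List.pyGetD cols i 0)) := by
  rw [pv_detperm]
  exact pv_leib m cols items.length items rows h1 rfl h2


-- ---- B-side: extended Euclid vs brute-force search ----

theorem pv_egcd_loop_eq (oldr r olds s : Int) (hr : r ≠ 0) :
    egcd_loop oldr r olds s
      = egcd_loop r (oldr - PySem.Int.floordiv oldr r * r) s (olds - PySem.Int.floordiv oldr r * s) := by
  rw [egcd_loop, if_neg (by simpa using hr)]

theorem pv_egcd_loop_zero (oldr olds s : Int) : egcd_loop oldr 0 olds s = (oldr, olds) := by
  rw [egcd_loop]; rfl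

-- invariant: both tracked values stay congruent to a·coeff modulo m₀
theorem pv_egcd_bezout (a m : Int) :
    ∀ (fuel : Nat) (oldr r olds s : Int), r.natAbs ≤ fuel →
    (∃ t, oldr = a * olds + m * t) → (∃ t, r = a * s + m * t) →
    ∃ t, (egcd_loop oldr r olds s).1 = a * (egcd_loop oldr r olds s).2 + m * t := by
  intro fuel
  induction fuel with
  | zero =>
    intro oldr r olds s hle h1 h2
    have hr0 : r = 0 := by omega
    subst hr0
    rw [pv_egcd_loop_zero]
    exact h1
  | succ fuel ih =>
    intro oldr r olds s hle h1 h2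
    by_cases hr : r = 0
    · subst hr; rw [pv_egcd_loop_zero]; exact h1
    · rw [pv_egcd_loop_eq oldr r olds s hr]
      have habs : (oldr - PySem.Int.floordiv oldr r * r).natAbs ≤ fuel := by
        rw [pv_egcd_step]
        have := pv_mod_abs_lt oldr r hr
        omega
      obtain ⟨t1, ht1⟩ := h1
      obtain ⟨t2, ht2⟩ := h2
      refine ih r _ s _ habs ⟨t2, ht2⟩ ⟨t1 - PySem.Int.floordiv oldr r * t2, ?_⟩
      rw [ht1, ht2]; ring

theorem pv_egcd_gcd :
    ∀ (fuel : Nat) (oldr r olds s : Int), r.natAbs ≤ fuel → 0 ≤ oldr → 0 ≤ r →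
    (egcd_loop oldr r olds s).1 = Int.gcd oldr r := by
  intro fuel
  induction fuel with
  | zero =>
    intro oldr r olds s hle h1 h2
    have hr0 : r = 0 := by omega
    subst hr0
    rw [pv_egcd_loop_zero, Int.gcd_zero_right]
    simp [Int.natAbs_of_nonneg h1]
  | succ fuel ih =>
    intro oldr r olds s hle h1 h2
    by_cases hr : r = 0
    · subst hr
      rw [pv_egcd_loop_zero, Int.gcd_zero_right]
      simp [Int.natAbs_of_nonneg h1]
    · have hrpos : 0 < r := by omega
      rw [pv_egcd_loop_eq oldr r olds s hr, pv_egcd_step]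
      rw [ih r _ s _ (by have := pv_mod_abs_lt oldr r hr; omega)
        (by omega) (PySem.Int.mod_nonneg oldr hrpos)]
      rw [PySem.Int.mod_eq_emod_of_pos hrpos]
      rw [Int.gcd_comm r (oldr % r), Int.gcd_emod]

-- A's search loop: finds nothing / finds the unique hit
theorem pv_loop_none (b m : Int) :
    ∀ l : List Int, (∀ y ∈ l, PySem.Int.mod (b * y) m ≠ 1) → mod_inverse_loop b m l = -1 := by
  intro l
  induction l with
  | nil => intro _; rfl
  | cons x xs ih =>
    intro h
    rw [mod_inverse_loop, if_neg (by simpa using h x (by simp))]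
    exact ih (fun y hy => h y (by simp [hy]))

theorem pv_loop_find (b m x0 : Int) :
    ∀ l : List Int, x0 ∈ l → PySem.Int.mod (b * x0) m = 1 →
    (∀ y ∈ l, PySem.Int.mod (b * y) m = 1 → y = x0) → mod_inverse_loop b m l = x0 := by
  intro l
  induction l with
  | nil => intro h; simp at h
  | cons x xs ih =>
    intro hmem hx0 huniq
    by_cases hx : PySem.Int.mod (b * x) m = 1
    · rw [mod_inverse_loop, if_pos (by simpa using hx)]
      exact (huniq x (by simp) hx).symm ▸ rfl
    · rw [mod_inverse_loop, if_neg (by simpa using hx)]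
      have hmem' : x0 ∈ xs := by
        rcases List.mem_cons.1 hmem with h | h
        · exact absurd (h ▸ hx0) hx
        · exact h
      exact ih hmem' hx0 (fun y hy => huniq y (by simp [hy]))

-- (a*x) % m == 1 forces gcd(a, m) = 1
theorem pv_gcd_one (b m y : Int) (h : PySem.Int.mod (b * y) m = 1) : Int.gcd b m = 1 := by
  have hq := PySem.Int.floordiv_mul_add_mod (b * y) m
  rw [h] at hq
  have hdvd : (Int.gcd b m : Int) ∣ 1 := by
    have h1 : (Int.gcd b m : Int) ∣ b := Int.gcd_dvd_left b m
    have h2 : (Int.gcd b m : Int) ∣ m := Int.gcd_dvd_right b m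
    have : (Int.gcd b m : Int) ∣ b * y - (b * y - 1) := by
      refine dvd_sub (Dvd.dvd.mul_right h1 y) ?_
      have : b * y - 1 = PySem.Int.floordiv (b * y) m * m := by omega
      rw [this]
      exact Dvd.dvd.mul_left h2 _
    simpa using this
  have hdn : Int.gcd b m ∣ 1 := by exact_mod_cast hdvd
  exact Nat.dvd_one.mp hdn

theorem pv_mod_one_of_dvd (m z : Int) (h2 : 2 ≤ m) (h : m ∣ (z - 1)) : PySem.Int.mod z m = 1 := by
  obtain ⟨k, hk⟩ := h
  have hz : z = 1 + m * k := by omega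
  rw [PySem.Int.mod_eq_emod_of_pos (by omega), hz, Int.add_mul_emod_self_left]
  exact Int.emod_eq_of_lt (by omega) (by omega)

theorem pv_mod_dvd_sub (a m : Int) (hm : 0 < m) : m ∣ (PySem.Int.mod a m - a) := by
  have hq := PySem.Int.floordiv_mul_add_mod a m
  exact ⟨-(PySem.Int.floordiv a m), by linear_combination hq⟩

theorem pv_modinv_le_one (a m : Int) (h : m ≤ 1) : mod_inverse a m = -1 := by
  unfold mod_inverse
  rw [PySem.List.pyRange_one_eq_nil (by omega)]
  rfl

theorem pv_inv_alt_le_one (a m : Int) (hm : m ≠ 0) (h : m ≤ 1) : mod_inv_alt a m = none := by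
  unfold mod_inv_alt
  rcases lt_or_eq_of_le h with h1 | h1
  · rcases lt_trichotomy m 0 with h2 | h2 | h2
    · rw [if_neg]
      simp only [beq_iff_eq]
      have := PySem.Int.mod_neg_bounds
        (PySem.Int.mod a m * PySem.Int.mod (egcd (PySem.Int.mod a m) m).2 m) h2
      omega
    · exact absurd h2 hm
    · omega
  · subst h1
    rw [if_neg]
    simp only [beq_iff_eq]
    rw [PySem.Int.mod_eq_emod_of_pos (by omega : (0:Int) < 1)]
    simp

-- the heart: for m ≥ 2, extended Euclid finds the inverse exactly when the brute loop does,
-- and then both return the same (unique) representative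
theorem pv_inv_found (d m : Int) (hm : 2 ≤ m) (hg : Int.gcd d m = 1) :
    1 ≤ mod_inverse d m ∧ mod_inverse d m < m ∧
    PySem.Int.mod (PySem.Int.mod d m * mod_inverse d m) m = 1 ∧
    mod_inv_alt d m = some (mod_inverse d m) := by
  have hmpos : (0:Int) < m := by omega
  set b := PySem.Int.mod d m with hb
  have hb0 : 0 ≤ b := PySem.Int.mod_nonneg d hmpos
  have hbm : b < m := PySem.Int.mod_lt d hmpos
  have hgb : Int.gcd b m = 1 := by
    rw [hb, PySem.Int.mod_eq_emod_of_pos hmpos, Int.gcd_emod]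
    exact hg
  -- Bezout from the extended Euclid loop
  have hg1 : (egcd b m).1 = 1 := by
    unfold egcd
    rw [pv_egcd_gcd m.natAbs b m 1 0 (le_refl _) hb0 (by omega), hgb]
    simp
  obtain ⟨t, ht⟩ := pv_egcd_bezout b m m.natAbs b m 1 0 (le_refl _)
    ⟨0, by ring⟩ ⟨1, by ring⟩
  rw [show egcd_loop b m 1 0 = egcd b m from rfl, hg1] at ht
  set s' := (egcd b m).2 with hs'
  set x0 := PySem.Int.mod s' m with hx0
  have hx00 : 0 ≤ x0 := PySem.Int.mod_nonneg s' hmpos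
  have hx0m : x0 < m := PySem.Int.mod_lt s' hmpos
  -- b * x0 ≡ 1 (mod m)
  have hdvd : m ∣ (b * x0 - 1) := by
    obtain ⟨k, hk⟩ := pv_mod_dvd_sub s' m hmpos
    exact ⟨b * k - t, by rw [← hx0] at hk; nlinarith [hk, ht]⟩
  have hchk : PySem.Int.mod (b * x0) m = 1 := pv_mod_one_of_dvd m (b * x0) hm (by simpa using hdvd)
  have hx0ne : x0 ≠ 0 := by
    intro hc
    rw [hc, mul_zero] at hchk
    rw [PySem.Int.mod_eq_emod_of_pos hmpos] at hchk
    simp at hchk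
  -- uniqueness of the representative in [1, m)
  have huniq : ∀ y, 1 ≤ y → y < m → PySem.Int.mod (b * y) m = 1 → y = x0 := by
    intro y h1 h2 hy
    have hdy : m ∣ (b * y - 1) := by
      have hq := PySem.Int.floordiv_mul_add_mod (b * y) m
      rw [hy] at hq
      exact ⟨PySem.Int.floordiv (b * y) m, by linear_combination -hq⟩
    have hdd : m ∣ b * (y - x0) := by
      have : b * (y - x0) = (b * y - 1) - (b * x0 - 1) := by ring
      rw [this]
      exact dvd_sub hdy hdvd
    have hcop : IsCoprime (m : Int) b := by
      rw [Int.isCoprime_iff_gcd_eq_one, Int.gcd_comm]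
      exact hgb
    have hdvd2 := hcop.dvd_of_dvd_mul_left hdd
    have hz : y - x0 = 0 := Int.eq_zero_of_dvd_of_natAbs_lt_natAbs hdvd2 (by omega)
    omega
  -- A's loop returns x0
  have hloop : mod_inverse d m = x0 := by
    unfold mod_inverse
    rw [← hb]
    refine pv_loop_find b m x0 _ (PySem.List.mem_pyRange_one.2 ⟨by omega, by omega⟩) hchk ?_
    intro y hy hy1
    have hyb := PySem.List.mem_pyRange_one.1 hy
    exact huniq y (by omega) (by omega) hy1
  refine ⟨by omega, by omega, by rw [hloop]; exact hchk, ?_⟩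
  unfold mod_inv_alt
  rw [hloop]
  have hcond : (PySem.Int.mod (b * x0) m == 1) = true := by simpa using hchk
  rw [if_pos hcond]

theorem pv_inv_none (d m : Int) (hm : 2 ≤ m) (hg : Int.gcd d m ≠ 1) :
    mod_inverse d m = -1 ∧ mod_inv_alt d m = none := by
  have hmpos : (0:Int) < m := by omega
  have hgb : Int.gcd (PySem.Int.mod d m) m ≠ 1 := by
    rw [PySem.Int.mod_eq_emod_of_pos hmpos, Int.gcd_emod]
    exact hg
  constructor
  · unfold mod_inverse
    exact pv_loop_none _ m _ (fun y _ hy => hgb (pv_gcd_one _ m y hy))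
  · unfold mod_inv_alt
    rw [if_neg]
    simp only [beq_iff_eq]
    intro hc
    exact hgb (pv_gcd_one _ m _ hc)

-- the two inverse routines agree as Option-valued functions (m ≠ 0)
theorem pv_inv_main (d m : Int) (hm : m ≠ 0) :
    mod_inv_alt d m = (if mod_inverse d m = -1 then none else some (mod_inverse d m)) := by
  by_cases h2 : 2 ≤ m
  · by_cases hg : Int.gcd d m = 1
    · obtain ⟨h1, _, _, h4⟩ := pv_inv_found d m h2 hg
      rw [h4, if_neg (by omega)]
    · obtain ⟨h1, h2'⟩ := pv_inv_none d m h2 hg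
      rw [h1, h2']
      rfl
  · rw [pv_modinv_le_one d m (by omega), pv_inv_alt_le_one d m hm (by omega)]
    rfl

-- A's mod_inverse is unchanged by pre-reducing its argument
theorem pv_modinv_mod (d m : Int) : mod_inverse (PySem.Int.mod d m) m = mod_inverse d m := by
  unfold mod_inverse
  rw [pv_mod_idem]

-- if the brute loop succeeds, m ≥ 2 and the determinant is invertible
theorem pv_modinv_ne (d m : Int) (hm : m ≠ 0) (h : mod_inverse d m ≠ -1) :
    2 ≤ m ∧ Int.gcd d m = 1 := by
  by_cases h2 : 2 ≤ m
  · refine ⟨h2, ?_⟩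
    by_contra hg
    exact h (pv_inv_none d m h2 hg).1
  · exact absurd (pv_modinv_le_one d m (by omega)) h


-- ---- glue: B's determinants are A's determinants ----

theorem pv_map_id (l : List Int) (n : Int) (hn : (l.length : Int) = n) :
    (PySem.List.pyRange 0 n 1).map (fun i => PySem.List.pyGetD l i 0) = l := by
  rw [← hn]
  exact PySem.List.map_pyGetD_pyRange_zero' l 0

theorem pv_det_perm_top (matrix : List (List Int))
    (hn : 1 ≤ matrix.length) (hrows : ∀ row ∈ matrix, matrix.length ≤ row.length) :
    det_perm matrix (PySem.List.pyRange 0 (matrix.length : Int) 1)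
        (PySem.List.pyRange 0 (matrix.length : Int) 1)
        (signed_perms (PySem.List.pyRange 0 (matrix.length : Int) 1))
      = calculate_determinant matrix := by
  have hlen : (PySem.List.pyRange 0 (matrix.length : Int) 1).length = matrix.length := by
    simp [PySem.List.length_pyRange_one]
  rw [pv_detperm_eq matrix _ _ _ (by omega) rfl]
  rw [pv_map_id (PySem.List.pyRange 0 (matrix.length : Int) 1) (matrix.length : Int) (by rw [hlen])]
  rw [← pv_det_top matrix hrows]

theorem pv_det_perm_cof (matrix : List (List Int)) (x y : Int)
    (hn : 2 ≤ matrix.length)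
    (hx0 : 0 ≤ x) (hxn : x < (matrix.length : Int)) (hy0 : 0 ≤ y) (hyn : y < (matrix.length : Int)) :
    det_perm matrix
        ((PySem.List.pyRange 0 (matrix.length : Int) 1).filter (fun i => i != y))
        ((PySem.List.pyRange 0 (matrix.length : Int) 1).filter (fun j => j != x))
        (signed_perms (PySem.List.pyRange 0 ((matrix.length : Int) - 1) 1))
      = det_idx matrix
          ((PySem.List.pyRange 0 (matrix.length : Int) 1).filter (fun i => i != y))
          ((PySem.List.pyRange 0 (matrix.length : Int) 1).filter (fun j => j != x)) := by
  have hrl := pv_filter_range_len (matrix.length : Int) y hy0 hyn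
  have hcl := pv_filter_range_len (matrix.length : Int) x hx0 hxn
  have hil : (PySem.List.pyRange 0 ((matrix.length : Int) - 1) 1).length = matrix.length - 1 := by
    rw [PySem.List.length_pyRange_one]; omega
  rw [pv_detperm_eq matrix _ _ _ (by omega) (by omega)]
  congr 1
  exact pv_map_id ((PySem.List.pyRange 0 (matrix.length : Int) 1).filter (fun j => j != x))
    ((matrix.length : Int) - 1) (by rw [hcl]; omega)

-- 1x1 determinant is the single entry
theorem pv_det1 (matrix : List (List Int)) (h : matrix.length = 1) :
    calculate_determinant matrix = (matrix.headD []).headD 0 := by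
  obtain ⟨row, hrow⟩ := List.length_eq_one_iff.1 h
  subst hrow
  rw [calculate_determinant, if_pos (by simp)]
  cases row <;> simp [PySem.List.pyGetD_zero]

-- A returns none exactly when its brute-force inverse search fails
theorem pv_A_none (matrix : List (List Int)) (modulus : Int)
    (h : mod_inverse (calculate_determinant matrix) modulus = -1) :
    matrix_mod_inverse matrix modulus = none := by
  rw [matrix_mod_inverse]
  rw [pv_modinv_mod, h]
  rfl


-- ---- the D_ region: 0x0 and invertible 1x1 matrices ----

theorem pv_det_nil : calculate_determinant [] = 0 := by
  rw [calculate_determinant]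
  rw [if_neg (by simp), if_neg (by simp)]
  simp only [List.length_nil]
  rw [show ((0:Nat):Int) = (0:Int) from rfl]
  rw [show (PySem.List.pyRange (0:Int) (0:Int) 1) = [] from by decide]
  rfl

theorem pv_detperm_nil (m : List (List Int)) (cols : List Int) :
    det_perm m [] cols [([], 1)] = 1 := by
  rw [pv_detperm]
  simp [pvP]

theorem pv_A_empty (modulus : Int) (hm0 : modulus ≠ 0) :
    matrix_mod_inverse [] modulus = none := by
  apply pv_A_none
  rw [pv_det_nil]
  by_cases h2 : 2 ≤ modulus
  · refine (pv_inv_none 0 modulus h2 ?_).1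
    rw [Int.gcd_zero_left]
    omega
  · exact pv_modinv_le_one _ _ (by omega)

theorem pv_B_empty (modulus : Int) (h2m : 2 ≤ modulus) :
    matrix_mod_inverse_alt [] modulus = some [] := by
  rw [matrix_mod_inverse_alt]
  simp only [List.length_nil, Nat.cast_zero]
  rw [show (PySem.List.pyRange (0:Int) (0:Int) 1) = [] from by decide]
  rw [pv_sp_nil, pv_detperm_nil]
  obtain ⟨_, _, _, hsome⟩ := pv_inv_found 1 modulus h2m (by simp [Int.gcd])
  rw [hsome]
  rfl

theorem pv_A_one (matrix : List (List Int)) (modulus : Int) (h1 : matrix.length = 1)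
    (hinv : mod_inverse (calculate_determinant matrix) modulus ≠ -1) :
    matrix_mod_inverse matrix modulus = some [[0]] := by
  rw [matrix_mod_inverse, pv_modinv_mod]
  rw [if_neg (by simpa using hinv)]
  dsimp only
  rw [pv_build ((matrix.length : Int))
    (fun r c => (-1 : Int) ^ (r + c).toNat * calculate_determinant (get_matrix_minor matrix r c))]
  rw [pv_trans_outer (matrix.length : Int) matrix.length 0
    (fun r c => (-1 : Int) ^ (r + c).toNat * calculate_determinant (get_matrix_minor matrix r c))
    (le_refl 0) (by simp)]
  rw [pv_norm_outer (matrix.length : Int) _ modulus matrix.length 0 _ (le_refl 0) (by simp)]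
  simp only [h1, Nat.cast_one]
  have hmat1 : ∀ g : Int → Int → Int, pvMatF 1 g = [[g 0 0]] := by
    intro g
    rw [pvMatF, show (PySem.List.pyRange (0:Int) (1:Int) 1) = [0] from by decide]
    rfl
  rw [hmat1]
  have hminor : get_matrix_minor matrix 0 0 = [] := by
    rw [pv_minor_erase matrix 0 0 (le_refl 0) (le_refl 0)]
    obtain ⟨row, hrow⟩ := List.length_eq_one_iff.1 h1
    subst hrow
    rfl
  simp [hminor, pv_det_nil, PySem.Int.mod, Int.zero_fmod]

theorem pv_B_one (matrix : List (List Int)) (modulus : Int) (h1 : matrix.length = 1)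
    (h2m : 2 ≤ modulus) (hrows : ∀ row ∈ matrix, matrix.length ≤ row.length)
    (hg : Int.gcd (calculate_determinant matrix) modulus = 1) :
    matrix_mod_inverse_alt matrix modulus
      = some [[mod_inverse (calculate_determinant matrix) modulus]] := by
  obtain ⟨hx1, hxm, _, hsome⟩ := pv_inv_found (calculate_determinant matrix) modulus h2m hg
  rw [matrix_mod_inverse_alt]
  rw [pv_det_perm_top matrix (by omega) hrows, hsome]
  dsimp only
  simp only [h1, Nat.cast_one]
  rw [show (PySem.List.pyRange (0:Int) (1:Int) 1) = [0] from by decide]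
  simp only [List.map_cons, List.map_nil]
  congr 2
  rw [show (List.filter (fun i => i != (0:Int)) [(0:Int)]) = [] from by decide]
  rw [show ((1:Int) - 1) = 0 from by ring,
    show (PySem.List.pyRange (0:Int) (0:Int) 1) = [] from by decide, pv_sp_nil, pv_detperm_nil]
  rw [show (if (PySem.Int.mod ((0:Int) + 0) 2 == 0) = true then (1:Int) else -1) = 1 from by decide]
  rw [one_mul, one_mul]
  rw [PySem.Int.mod_eq_emod_of_pos (by omega)]
  rw [Int.emod_eq_of_lt
    (by omega : (0:Int) ≤ mod_inverse (calculate_determinant matrix) modulus)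
    (by omega : mod_inverse (calculate_determinant matrix) modulus < modulus)]

-- ===== VERDICT (by name: the statement is the Claim_ definition above) =====
theorem matrix_mod_inverse_spec : Claim_unchanged_matrix_mod_inverse := by
  intro matrix modulus hdom hpre hnD
  obtain ⟨hm0, hrows⟩ := hpre
  show matrix_mod_inverse matrix modulus = matrix_mod_inverse_alt matrix modulus
  by_cases hmat : matrix = []
  · -- 0x0: outside D_ this forces modulus ≤ 1, where both sides return none
    subst hmat
    have hm1 : modulus ≤ 1 := by
      by_contra hc
      exact hnD ⟨by omega, Or.inl rfl⟩
    rw [pv_A_none [] modulus (pv_modinv_le_one _ _ hm1)]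
    rw [matrix_mod_inverse_alt]
    rw [pv_inv_alt_le_one _ _ hm0 hm1]
  · have hn1 : 1 ≤ matrix.length := by
      cases matrix with
      | nil => exact absurd rfl hmat
      | cons a b => simp
    have hdetB := pv_det_perm_top matrix hn1 hrows
    by_cases hinv : mod_inverse (calculate_determinant matrix) modulus = -1
    · rw [pv_A_none matrix modulus hinv]
      rw [matrix_mod_inverse_alt]
      rw [hdetB, pv_inv_main _ _ hm0, if_pos hinv]
    · obtain ⟨h2m, hgcd⟩ := pv_modinv_ne _ _ hm0 hinv
      rcases Nat.lt_or_ge matrix.length 2 with hn2 | hn2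
      · -- 1x1 with invertible determinant: that is D_, contradicting hnD
        exfalso
        have hlen1 : matrix.length = 1 := by omega
        refine hnD ⟨by omega, Or.inr ⟨hlen1, ?_⟩⟩
        rw [← pv_det1 matrix hlen1]
        exact hgcd
      · -- n >= 2: the cofactor machinery
        rw [matrix_mod_inverse, matrix_mod_inverse_alt]
        rw [hdetB, pv_inv_main _ _ hm0, if_neg hinv, pv_modinv_mod]
        rw [if_neg (by simpa using hinv)]
        dsimp only
        congr 1
        rw [pv_build ((matrix.length : Int))
          (fun r c => (-1 : Int) ^ (r + c).toNat * calculate_determinant (get_matrix_minor matrix r c))]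
        rw [pv_trans_outer (matrix.length : Int) matrix.length 0
          (fun r c => (-1 : Int) ^ (r + c).toNat * calculate_determinant (get_matrix_minor matrix r c))
          (le_refl 0) (by simp)]
        rw [pv_norm_outer (matrix.length : Int) _ modulus matrix.length 0 _ (le_refl 0) (by simp)]
        refine pv_matF_congr _ _ _ (fun x y hx0 hxn hy0 hyn => ?_)
        rw [if_pos hx0, if_pos (⟨hx0, hy0⟩ : (0:Int) ≤ x ∧ (0:Int) ≤ y), pv_mod_idem]
        rw [pv_sign (y + x) (by omega), pv_cof matrix hrows y x hy0 hyn hx0 hxn]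
        rw [pv_det_perm_cof matrix x y hn2 hx0 hxn hy0 hyn]
        rw [Int.add_comm x y]
theorem matrix_mod_inverse_changed : Claim_changed_matrix_mod_inverse := by
  unfold Claim_changed_matrix_mod_inverse
  have hdet : calculate_determinant [[3]] = 3 := by
    rw [pv_det1 [[3]] (by decide)]
    rfl
  refine ⟨by decide, by decide, ?_, ?_, ?_, by decide⟩
  · show D_matrix_mod_inverse [[3]] 26
    exact ⟨by norm_num, Or.inr ⟨by decide, by decide⟩⟩
  · show matrix_mod_inverse [[3]] 26 = some [[0]]
    refine pv_A_one [[3]] 26 (by decide) ?_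
    rw [hdet]
    decide
  · show matrix_mod_inverse_alt [[3]] 26 = some [[9]]
    rw [pv_B_one [[3]] 26 (by decide) (by norm_num) (by decide) (by rw [hdet]; decide)]
    rw [hdet]
    norm_num
    decide
theorem matrix_mod_inverse_tight : Claim_exact_matrix_mod_inverse := by
  intro matrix modulus hdom hpre hD
  obtain ⟨hm0, hrows⟩ := hpre
  obtain ⟨h2m, hcase⟩ := hD
  rcases hcase with hnil | ⟨h1, hg⟩
  · subst hnil
    rw [pv_A_empty modulus hm0, pv_B_empty modulus h2m]
    simp
  · have hgdet : Int.gcd (calculate_determinant matrix) modulus = 1 := by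
      rw [pv_det1 matrix h1]
      exact hg
    obtain ⟨hx1, hxm, _, _⟩ := pv_inv_found (calculate_determinant matrix) modulus h2m hgdet
    rw [pv_A_one matrix modulus h1 (by omega), pv_B_one matrix modulus h1 h2m hrows hgdet]
    intro heq
    simp only [Option.some.injEq, List.cons.injEq] at heq
    omega
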